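-- pv_equiv track=rewrite | github.com/egavrin/devagent | ai_dev_agent/cli/react/plan_executor.py | _parse_task_breakdown
-- ===== SOURCE A (Python) =====
-- def _parse_task_breakdown(response_text: str) -> list:
--     """
--     Parse LLM response into list of (title, priority, description) tuples.
--
--     Args:
--         response_text: LLM response with task breakdown
--
--     Returns:
--         List of (title, priority, description) tuples
--     """
--     tasks = []
--     lines = response_text.strip().split('\n')
--
--     current_task = None
--     for line in lines:
--         line = line.strip()
--         if not line:
--             continue
--
--         # Look for numbered tasks (1., 2., etc.)
--         if line[0].isdigit() and '.' in line[:3]: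
--             # Extract task title
--             title = line.split('.', 1)[1].strip()
--             # Remove markdown bold/emphasis
--             title = title.replace('**', '').replace('*', '')
--             # Extract priority if mentioned
--             priority = "medium"
--             if "critical" in title.lower():
--                 priority = "critical"
--             elif "high" in title.lower() or "important" in title.lower():
--                 priority = "high"
--             elif "low" in title.lower():
--                 priority = "low"
--
--             # Clean up title
--             title = title.split('(')[0].strip()  # Remove parenthetical notes
--             title = title.split('-')[0].strip()  # Remove dashes
--
--             current_task = [title, priority, title]
--             tasks.append(current_task)
--         elif current_task and line:
--             # Additional description for current task
--             current_task[2] = line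
--
--     # Fallback: if no tasks parsed, create simple task breakdown
--     if not tasks:
--         # Try to extract any actionable phrases
--         simple_tasks = [
--             ("Analyze the query", "high", "Understand what needs to be done"),
--             ("Execute the task", "high", "Perform the requested operation"),
--             ("Verify the result", "medium", "Confirm the output is correct"),
--         ]
--         return simple_tasks
--
--     return [(t[0], t[1], t[2]) for t in tasks]
-- ===== SOURCE B (Python) =====
-- def _parse_task_breakdown(response_text: str) -> list:
--     """Recursive block-splitting reimplementation: drop the preamble before the
--     first numbered line, then recursively peel off (header, body) blocks."""
--     lines = [ln.strip() for ln in response_text.strip().split('\n')]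
--
--     def is_header(ln):
--         return bool(ln) and ln[0].isdigit() and '.' in ln[:3]
--
--     def make_task(header, body):
--         title = header.split('.', 1)[1].strip().replace('**', '').replace('*', '')
--         low = title.lower()
--         if 'critical' in low:
--             priority = 'critical'
--         elif 'high' in low or 'important' in low:
--             priority = 'high'
--         elif 'low' in low:
--             priority = 'low'
--         else:
--             priority = 'medium'
--         title = title.split('(')[0].strip().split('-')[0].strip()
--         followups = [b for b in body if b]
--         desc = followups[-1] if followups else title
--         return (title, priority, desc)
--
--     def parse(ls):
--         if not ls:
--             return []
--         header, rest = ls[0], ls[1:]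
--         k = 0
--         while k < len(rest) and not is_header(rest[k]):
--             k += 1
--         return [make_task(header, rest[:k])] + parse(rest[k:])
--
--     while lines and not is_header(lines[0]):
--         lines = lines[1:]
--     if not lines:
--         return [
--             ("Analyze the query", "high", "Understand what needs to be done"),
--             ("Execute the task", "high", "Perform the requested operation"),
--             ("Verify the result", "medium", "Confirm the output is correct"),
--         ]
--     return parse(lines)
-- ===== Notes on version B (the rewrite author's own statement) =====
-- stated objective: alternative
-- what changed: A's single pass with a mutable current_task (aliased into the result list and overwritten per follow-up line) is replaced by dropping the preamble before the first numbered line and recursively peeling (header, body) blocks, computing each task's description as the last non-empty body line.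
import Mathlib
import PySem

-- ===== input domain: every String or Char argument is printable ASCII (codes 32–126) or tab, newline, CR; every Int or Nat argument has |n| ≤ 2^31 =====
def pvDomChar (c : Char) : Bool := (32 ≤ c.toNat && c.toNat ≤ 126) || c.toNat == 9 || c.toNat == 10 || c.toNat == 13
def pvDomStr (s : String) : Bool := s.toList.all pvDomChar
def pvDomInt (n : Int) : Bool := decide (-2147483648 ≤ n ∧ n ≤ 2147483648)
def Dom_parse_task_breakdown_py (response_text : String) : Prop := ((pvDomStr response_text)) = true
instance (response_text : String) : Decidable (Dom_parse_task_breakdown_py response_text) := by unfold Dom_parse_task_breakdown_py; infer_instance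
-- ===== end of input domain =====

-- B re-implements A's single mutable-state loop as a recursive block splitter (drop preamble,
-- peel (header, body) blocks); objective: alternative decomposition, same cost.

-- ===== PORT A =====

-- shared with port B: both Pythons contain this identical header test
-- (`line[0].isdigit() and '.' in line[:3]`; in A the line is already known nonempty, in B
-- `bool(ln)` guards it, so the [] case below is A-unreachable)
def pvIsHeader (line : String) : Bool :=
  (match line.toList with
   | [] => false
   | c :: _ => PySem.Chars.isdigit c) && PySem.Str.isIn "." (PySem.Str.slice line none (some 3))

-- shared with port B: the identical title/priority computation both Pythons perform on a header
-- line (the `.getD` defaults are unreachable: '.' occurs in the line, and split always returns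
-- a nonempty list)
def pvHeaderParse (line : String) : String × String :=
  let title := PySem.Str.strip (((PySem.Str.splitMax? line "." 1).getD []).getD 1 "")
  let title := PySem.Str.replace (PySem.Str.replace title "**" "") "*" ""
  let low := PySem.Str.lower title
  let priority :=
    if PySem.Str.isIn "critical" low then "critical"
    else if PySem.Str.isIn "high" low || PySem.Str.isIn "important" low then "high"
    else if PySem.Str.isIn "low" low then "low"
    else "medium"
  let title := PySem.Str.strip (((PySem.Str.splitMax? title "(" (-1)).getD []).getD 0 "")
  let title := PySem.Str.strip (((PySem.Str.splitMax? title "-" (-1)).getD []).getD 0 "")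
  (title, priority)

def pvFallback : List (String × String × String) :=
  [("Analyze the query", "high", "Understand what needs to be done"),
   ("Execute the task", "high", "Perform the requested operation"),
   ("Verify the result", "medium", "Confirm the output is correct")]

-- A's `current_task = [title, priority, title]`
def pvTaskOf (line : String) : String × String × String :=
  let tp := pvHeaderParse line
  (tp.1, tp.2, tp.1)

-- A's in-place `current_task[2] = line`: current_task aliases the LAST appended task
def pvSetLastDesc : List (String × String × String) → String → List (String × String × String)
  | [], _ => []
  | [t], line => [(t.1, t.2.1, line)]
  | t :: u :: ts, line => t :: pvSetLastDesc (u :: ts) line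

-- A's loop body on an already-stripped line; `current_task` is truthy iff `tasks` is nonempty
-- (it is set exactly when a task was appended, and a nonempty Python list is always truthy)
def pvStepA (tasks : List (String × String × String)) (line : String) :
    List (String × String × String) :=
  if line = "" then tasks
  else if pvIsHeader line then tasks ++ [pvTaskOf line]
  else if !tasks.isEmpty then pvSetLastDesc tasks line
  else tasks

def parse_task_breakdown_py (response_text : String) : List (String × String × String) :=
  let lines := (PySem.Str.split? (PySem.Str.strip response_text) "\n").getD []
  let tasks := lines.foldl (fun tasks rawline => pvStepA tasks (PySem.Str.strip rawline)) []
  if tasks.isEmpty then pvFallback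
  else tasks.map (fun t => (t.1, t.2.1, t.2.2))

-- ===== PORT B =====

-- Source B's make_task(header, body)
def pvMkTask (header : String) (body : List String) : String × String × String :=
  let tp := pvHeaderParse header
  let followups := body.filter (fun b => b ≠ "")
  (tp.1, tp.2, followups.getLastD tp.1)

-- Source B's parse(ls): peel one (header, body) block, recurse on the rest
def pvParseB : List String → List (String × String × String)
  | [] => []
  | h :: rest =>
      pvMkTask h (rest.takeWhile (fun l => !pvIsHeader l)) ::
        pvParseB (rest.dropWhile (fun l => !pvIsHeader l))
  termination_by ls => ls.length
  decreasing_by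
    simpa using Nat.lt_succ_of_le (List.length_dropWhile_le _ rest)

def parse_task_breakdown_py_alt (response_text : String) : List (String × String × String) :=
  let lines := ((PySem.Str.split? (PySem.Str.strip response_text) "\n").getD []).map PySem.Str.strip
  let lines := lines.dropWhile (fun l => !pvIsHeader l)
  if lines.isEmpty then pvFallback else pvParseB lines

-- ===== PRECONDITION & SPEC =====
def Spec_parse_task_breakdown_py (response_text : String) (out : List (String × String × String)) : Prop := out = parse_task_breakdown_py_alt response_text
instance (response_text : String) (out : List (String × String × String)) : Decidable (Spec_parse_task_breakdown_py response_text out) := by unfold Spec_parse_task_breakdown_py; infer_instance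

-- ===== CLAIM (what is proved, stated in full; the proofs are below) =====
def Claim_equal_parse_task_breakdown_py : Prop := ∀ (response_text : String), Dom_parse_task_breakdown_py response_text → Spec_parse_task_breakdown_py response_text (parse_task_breakdown_py response_text)


-- ===== LEMMAS AND PROOFS =====

-- A's "last task with its description updated by the trailing body lines"
def pvGDesc (t : String × String × String) (body : List String) : String × String × String :=
  (t.1, t.2.1, (body.filter (fun b => b ≠ "")).getLastD t.2.2)

theorem pvIsHeader_ne_empty {l : String} (h : pvIsHeader l = true) : l ≠ "" := by
  intro he; subst he; simp [pvIsHeader] at h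

theorem pvStepA_empty (ts : List (String × String × String)) : pvStepA ts "" = ts := by
  simp [pvStepA]

theorem pvStepA_header {l : String} (ts : List (String × String × String))
    (hh : pvIsHeader l = true) : pvStepA ts l = ts ++ [pvTaskOf l] := by
  simp [pvStepA, pvIsHeader_ne_empty hh, hh]

theorem pvStepA_body {l : String} (ts : List (String × String × String)) (he : l ≠ "")
    (hh : pvIsHeader l = false) (hne : ts ≠ []) : pvStepA ts l = pvSetLastDesc ts l := by
  simp [pvStepA, he, hh, hne]

theorem pvStepA_body_nil {l : String} (hh : pvIsHeader l = false) : pvStepA [] l = [] := by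
  simp [pvStepA, hh]

theorem pvSetLastDesc_append (done : List (String × String × String)) (t : String × String × String)
    (line : String) : pvSetLastDesc (done ++ [t]) line = done ++ [(t.1, t.2.1, line)] := by
  induction done with
  | nil => rfl
  | cons a as ih =>
      cases as with
      | nil => rfl
      | cons b bs => simpa [pvSetLastDesc] using congrArg (List.cons a) ih

set_option maxHeartbeats 1000000 in
theorem pvParseB_nil : pvParseB [] = [] := by rw [pvParseB]

set_option maxHeartbeats 1000000 in
theorem pvParseB_cons (h : String) (rest : List String) :
    pvParseB (h :: rest) =
      pvMkTask h (rest.takeWhile (fun l => !pvIsHeader l)) ::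
        pvParseB (rest.dropWhile (fun l => !pvIsHeader l)) := by
  rw [pvParseB]

theorem pvMkTask_eq_gdesc (h : String) (body : List String) :
    pvMkTask h body = pvGDesc (pvTaskOf h) body := by
  simp only [pvMkTask, pvGDesc, pvTaskOf]

theorem pvGDesc_nil (t : String × String × String) : pvGDesc t [] = t := rfl

theorem pvGDesc_cons_empty (t : String × String × String) (body : List String) :
    pvGDesc t ("" :: body) = pvGDesc t body := by
  simp [pvGDesc]

theorem pvGDesc_cons (t : String × String × String) {l : String} (body : List String)
    (he : l ≠ "") : pvGDesc t (l :: body) = pvGDesc (t.1, t.2.1, l) body := by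
  simp only [pvGDesc, List.filter_cons]
  rw [if_pos (by simpa using he), List.getLastD_cons]

-- the loop invariant: from a state `done ++ [t]` (t = the current task), A's fold finishes the
-- current block into `pvGDesc t`, then produces exactly B's blocks
theorem pvFold_main (lines : List String) :
    ∀ (done : List (String × String × String)) (t : String × String × String),
      lines.foldl pvStepA (done ++ [t]) =
        done ++ pvGDesc t (lines.takeWhile (fun l => !pvIsHeader l)) ::
          pvParseB (lines.dropWhile (fun l => !pvIsHeader l)) := by
  induction lines with
  | nil => intro done t; simp [pvParseB_nil, pvGDesc_nil]
  | cons l ls ih =>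
      intro done t
      by_cases he : l = ""
      · subst he
        have hh : pvIsHeader "" = false := by simp [pvIsHeader]
        rw [List.foldl_cons, pvStepA_empty, ih done t, List.takeWhile_cons, List.dropWhile_cons]
        simp [hh, pvGDesc_cons_empty]
      · by_cases hh : pvIsHeader l = true
        · rw [List.foldl_cons, pvStepA_header _ hh,
            ih (done ++ [t]) (pvTaskOf l), List.takeWhile_cons, List.dropWhile_cons]
          simp [hh, pvGDesc_nil, pvParseB_cons, pvMkTask_eq_gdesc]
        · simp only [Bool.not_eq_true] at hh
          rw [List.foldl_cons, pvStepA_body _ he hh (by simp), pvSetLastDesc_append,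
            ih done (t.1, t.2.1, l), List.takeWhile_cons, List.dropWhile_cons]
          simp only [hh, Bool.not_false, if_true]
          rw [← pvGDesc_cons t _ he]

-- the fold stays empty over a header-free prefix
theorem pvFold_empty (lines : List String) (hpre : ∀ l ∈ lines, pvIsHeader l = false) :
    lines.foldl pvStepA [] = [] := by
  induction lines with
  | nil => rfl
  | cons l ls ih =>
      have h1 := hpre l (by simp)
      rw [List.foldl_cons]
      by_cases he : l = ""
      · rw [he, pvStepA_empty]; exact ih (fun x hx => hpre x (by simp [hx]))
      · rw [pvStepA_body_nil h1]; exact ih (fun x hx => hpre x (by simp [hx]))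

-- ===== VERDICT (by name: the statement is the Claim_ definition above) =====
theorem parse_task_breakdown_py_spec : Claim_equal_parse_task_breakdown_py := by
  intro response_text _
  unfold Spec_parse_task_breakdown_py parse_task_breakdown_py parse_task_breakdown_py_alt
  simp only [← List.foldl_map (f := PySem.Str.strip) (g := pvStepA)]
  set lines := ((PySem.Str.split? (PySem.Str.strip response_text) "\n").getD []).map PySem.Str.strip with hl
  clear_value lines
  have hpre : ∀ l ∈ lines.takeWhile (fun l => !pvIsHeader l), pvIsHeader l = false := by
    intro l hml
    simpa using List.mem_takeWhile_imp hml
  have h1 : lines.foldl pvStepA [] =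
      (lines.dropWhile (fun l => !pvIsHeader l)).foldl pvStepA [] := by
    conv_lhs => rw [← List.takeWhile_append_dropWhile (p := fun l => !pvIsHeader l) (l := lines)]
    rw [List.foldl_append, pvFold_empty _ hpre]
  rw [h1]
  cases hdw : lines.dropWhile (fun l => !pvIsHeader l) with
  | nil => simp
  | cons h rest =>
      have hne : lines.dropWhile (fun l => !pvIsHeader l) ≠ [] := by rw [hdw]; simp
      have hh : pvIsHeader h = true := by
        have h2 := List.head_dropWhile_not (fun l => !pvIsHeader l) (l := lines) hne
        simp only [hdw, List.head_cons] at h2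
        simpa using h2
      have h3 := pvFold_main rest [] (pvTaskOf h)
      simp only [List.nil_append] at h3
      rw [List.foldl_cons, pvStepA_header _ hh, List.nil_append, h3, pvParseB_cons,
        pvMkTask_eq_gdesc]
      simp
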